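-- pv_equiv track=rewrite | github.com/nju04zq/algorithm_code | easy/006_ZigZag_Conversion/ZigZag_Conversion.py | convert_one_line
-- ===== SOURCE A (Python) =====
-- def convert_one_line(s, n, nmax):
--     round_interval = (nmax - 1) * 2
--     if n == 0 or n == (nmax-1): #first line or last line
--         step_interval = round_interval
--     else:
--         step_interval = (nmax - n - 1) * 2
--
--     i, interval = n, step_interval
--     line_output = ""
--     while i < len(s):
--         line_output += s[i]
--         i += interval
--         if n > 0 and n < (nmax-1): #except first line and last line
--             interval = round_interval - interval
--
--     return line_output
-- ===== SOURCE B (Python) =====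
-- def convert_one_line(s, n, nmax):
--     cycle = (nmax - 1) * 2
--     out = []
--     for i in range(len(s)):
--         p = i % cycle
--         row = p if p < nmax else cycle - p
--         if row == n:
--             out.append(s[i])
--     return "".join(out)
-- ===== Notes on version B (the rewrite author's own statement) =====
-- stated objective: simpler
-- what changed: B replaces A's zigzag jumping (start at row index n, hop by alternating intervals) with a single left-to-right scan that computes each index's row from i % cycle and keeps the characters whose row equals n.
-- outside the precondition, e.g. on convert_one_line('ab', -1, 3): A returns 'b', B returns ''; on convert_one_line('a', 5, 1): A returns '', B raises ZeroDivisionError; on convert_one_line('ab', 0, 1): A does not finish within the time limit, B raises ZeroDivisionError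
import Mathlib
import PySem

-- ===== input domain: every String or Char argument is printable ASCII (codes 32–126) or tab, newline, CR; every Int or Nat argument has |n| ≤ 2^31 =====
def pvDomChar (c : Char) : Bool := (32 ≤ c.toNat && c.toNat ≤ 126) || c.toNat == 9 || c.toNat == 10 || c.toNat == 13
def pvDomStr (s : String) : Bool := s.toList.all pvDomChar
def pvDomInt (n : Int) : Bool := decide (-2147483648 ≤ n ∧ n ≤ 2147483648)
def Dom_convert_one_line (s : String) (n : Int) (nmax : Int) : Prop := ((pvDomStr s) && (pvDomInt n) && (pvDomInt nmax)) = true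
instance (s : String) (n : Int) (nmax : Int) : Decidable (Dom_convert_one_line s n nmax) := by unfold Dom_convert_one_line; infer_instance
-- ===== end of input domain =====

-- B scans the string once and selects characters whose zigzag row (computed from i % cycle)
-- equals n, instead of A's jumping traversal with alternating intervals (objective: simpler).


-- ===== PORT A =====
-- A's while loop; the fuel (cs.length + 1) is only a termination bound: inside
-- Pre_ every step advances i by at least 2, so the fuel is never exhausted.
def pvLoopA (cs : List Char) (n nmax roundInterval : Int) :
    Nat → Int → Int → List Char → List Char
  | 0, _, _, acc => acc
  | fuel+1, i, interval, acc =>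
    if i < (cs.length : Int) then
      pvLoopA cs n nmax roundInterval fuel (i + interval)
        (if 0 < n ∧ n < nmax - 1 then roundInterval - interval else interval)
        (acc ++ (PySem.List.pyGet? cs i).toList)
    else acc

def convert_one_line (s : String) (n : Int) (nmax : Int) : String :=
  let cs := s.toList
  let roundInterval := (nmax - 1) * 2
  let stepInterval := if n = 0 ∨ n = nmax - 1 then roundInterval else (nmax - n - 1) * 2
  String.mk (pvLoopA cs n nmax roundInterval (cs.length + 1) n stepInterval [])

-- ===== PORT B =====
def convert_one_line_alt (s : String) (n : Int) (nmax : Int) : String :=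
  let cs := s.toList
  let cycle := (nmax - 1) * 2
  String.mk ((List.range cs.length).foldl (fun acc i =>
      let p := PySem.Int.mod (Int.ofNat i) cycle
      let row := if p < nmax then p else cycle - p
      if row = n then acc ++ (PySem.List.pyGet? cs (Int.ofNat i)).toList else acc) [])

-- ===== PRECONDITION & SPEC =====
-- Pre_: the natural row-extraction domain (at least two rows and a valid row index),
-- plus the trivial region 0 ≤ n, len(s) ≤ n where A returns "" before its first step
-- (except nmax = 1 with nonempty s, where B raises ZeroDivisionError).  Outside Pre_
-- A diverges (nmax = 1, nonempty s, n = 0), eventually raises IndexError, or returns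
-- values produced by Python's negative-index wraparound (n < 0), accidents of A's
-- implementation.
def Pre_convert_one_line (s : String) (n : Int) (nmax : Int) : Prop :=
  (2 ≤ nmax ∧ 0 ≤ n ∧ n ≤ nmax - 1) ∨
  (0 ≤ n ∧ (s.toList.length : Int) ≤ n ∧
    (2 ≤ nmax ∨ s.toList.length = 0 ∨ nmax ≤ 0))
instance (s : String) (n : Int) (nmax : Int) : Decidable (Pre_convert_one_line s n nmax) := by
  unfold Pre_convert_one_line; infer_instance

def pvWitness_convert_one_line : String × Int × Int := ("PAYPALISHIRING", 1, 3)

def Spec_convert_one_line (s : String) (n : Int) (nmax : Int) (out : String) : Prop :=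
  out = convert_one_line_alt s n nmax
instance (s : String) (n : Int) (nmax : Int) (out : String) :
    Decidable (Spec_convert_one_line s n nmax out) := by
  unfold Spec_convert_one_line; infer_instance

-- ===== CLAIM (what is proved, stated in full; the proofs are below) =====
def Claim_equal_convert_one_line : Prop :=
  ∀ (s : String) (n : Int) (nmax : Int), Dom_convert_one_line s n nmax →
    Pre_convert_one_line s n nmax →
    Spec_convert_one_line s n nmax (convert_one_line s n nmax)

-- ===== LEMMAS AND PROOFS =====

-- the characters of row n, as a flatMap over indices from lo upward
def pvG (cs : List Char) (cycle n : Int) (j : Nat) : List Char :=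
  if (j : Int) % cycle = n ∨ (j : Int) % cycle = cycle - n then
    (PySem.List.pyGet? cs (j : Int)).toList
  else []

def pvSel (cs : List Char) (cycle n : Int) (lo : Nat) : List Char :=
  (List.range' lo (cs.length - lo)).flatMap (pvG cs cycle n)

lemma pv_mod_shift (c i t : Int) : (i + t) % c = (i % c + t) % c := by
  conv_lhs => rw [← Int.emod_add_ediv i c]
  rw [show i % c + c * (i / c) + t = i % c + t + c * (i / c) from by ring,
      Int.add_mul_emod_self_left]

lemma pv_mod_reduce (c a : Int) (h0 : c ≤ a) (h1 : a < 2 * c) : a % c = a - c := by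
  have h : a % c = (a - c) % c := by
    conv_lhs => rw [show a = (a - c) + c * 1 from by ring]
    rw [Int.add_mul_emod_self_left]
  rw [h, Int.emod_eq_of_lt (by omega) (by omega)]

lemma pvSel_nil (cs : List Char) (cycle n : Int) (lo : Nat) (h : cs.length ≤ lo) :
    pvSel cs cycle n lo = [] := by
  simp [pvSel, Nat.sub_eq_zero_of_le h]

lemma pvSel_cons (cs : List Char) (cycle n : Int) (lo : Nat) (h : lo < cs.length) :
    pvSel cs cycle n lo = pvG cs cycle n lo ++ pvSel cs cycle n (lo + 1) := by
  unfold pvSel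
  rw [show cs.length - lo = (cs.length - (lo + 1)) + 1 from by omega, List.range'_succ]
  simp

lemma pvSel_skip (cs : List Char) (cycle n : Int) :
    ∀ (k lo : Nat), (∀ j : Nat, lo ≤ j → j < lo + k → pvG cs cycle n j = []) →
      pvSel cs cycle n lo = pvSel cs cycle n (lo + k) := by
  intro k
  induction k with
  | zero => intro lo _; rfl
  | succ k ih =>
    intro lo hz
    by_cases h : lo < cs.length
    · rw [pvSel_cons cs cycle n lo h, hz lo (le_refl _) (by omega), List.nil_append,
          ih (lo + 1) (fun j h1 h2 => hz j (by omega) (by omega)),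
          show lo + 1 + k = lo + (k + 1) from by omega]
    · rw [pvSel_nil cs cycle n lo (by omega), pvSel_nil cs cycle n (lo + (k + 1)) (by omega)]

-- the main invariant for A's loop
lemma pvLoopA_eq (cs : List Char) (n nmax : Int)
    (h2 : 2 ≤ nmax) (hn0 : 0 ≤ n) (hn1 : n ≤ nmax - 1) :
    ∀ (fuel : Nat) (i interval : Int) (acc : List Char),
      0 ≤ i →
      ((i % ((nmax - 1) * 2) = n ∧
          interval = (if n = 0 ∨ n = nmax - 1 then (nmax - 1) * 2 else (nmax - n - 1) * 2))
        ∨ (¬(n = 0 ∨ n = nmax - 1) ∧ i % ((nmax - 1) * 2) = (nmax - 1) * 2 - n ∧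
            interval = 2 * n)) →
      (cs.length : Int) - i < 2 * fuel →
      pvLoopA cs n nmax ((nmax - 1) * 2) fuel i interval acc =
        acc ++ pvSel cs ((nmax - 1) * 2) n i.toNat := by
  intro fuel
  induction fuel with
  | zero =>
    intro i interval acc hi _ hfuel
    rw [pvSel_nil cs _ n i.toNat (by omega), List.append_nil]
    rfl
  | succ fuel ih =>
    intro i interval acc hi hinv hfuel
    have hcyc : 0 < (nmax - 1) * 2 := by omega
    by_cases hil : i < (cs.length : Int)
    · -- bounds on interval and the residue r := i % cycle
      have hr0 : 0 ≤ i % ((nmax - 1) * 2) := Int.emod_nonneg i (by omega)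
      have hrc : i % ((nmax - 1) * 2) < (nmax - 1) * 2 := Int.emod_lt_of_pos i hcyc
      have hint : 2 ≤ interval ∧ interval ≤ (nmax - 1) * 2 := by
        rcases hinv with ⟨_, h⟩ | ⟨hne, _, h⟩
        · split at h <;> omega
        · omega
      -- character selected at i
      have hgi : pvG cs ((nmax - 1) * 2) n i.toNat = (PySem.List.pyGet? cs i).toList := by
        unfold pvG
        rw [Int.toNat_of_nonneg hi, if_pos]
        rcases hinv with ⟨h, _⟩ | ⟨_, h, _⟩
        · exact Or.inl h
        · exact Or.inr h
      -- nothing selected strictly between i and i + interval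
      have hskip : ∀ j : Nat, i.toNat + 1 ≤ j → j < i.toNat + 1 + (interval - 1).toNat →
          pvG cs ((nmax - 1) * 2) n j = [] := by
        intro j hj1 hj2
        have hji : i < (j : Int) ∧ (j : Int) < i + interval := by omega
        have hmod : ((j : Int)) % ((nmax - 1) * 2) =
            (i % ((nmax - 1) * 2) + ((j : Int) - i)) % ((nmax - 1) * 2) := by
          rw [← pv_mod_shift]
          congr 1
          ring
        unfold pvG
        rw [if_neg]
        set t : Int := (j : Int) - i with ht
        set r : Int := i % ((nmax - 1) * 2) with hrr
        by_cases hlt : r + t < (nmax - 1) * 2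
        · rw [hmod, Int.emod_eq_of_lt (by omega) hlt]
          rcases hinv with ⟨h, hiv⟩ | ⟨hne, h, hiv⟩
          · split at hiv <;> omega
          · omega
        · rw [hmod, pv_mod_reduce _ _ (by omega) (by omega)]
          rcases hinv with ⟨h, hiv⟩ | ⟨hne, h, hiv⟩
          · split at hiv <;> omega
          · omega
      -- invariant at the next state
      have hinv' :
          ((i + interval) % ((nmax - 1) * 2) = n ∧
            (if 0 < n ∧ n < nmax - 1 then (nmax - 1) * 2 - interval else interval) =
              (if n = 0 ∨ n = nmax - 1 then (nmax - 1) * 2 else (nmax - n - 1) * 2))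
          ∨ (¬(n = 0 ∨ n = nmax - 1) ∧
            (i + interval) % ((nmax - 1) * 2) = (nmax - 1) * 2 - n ∧
            (if 0 < n ∧ n < nmax - 1 then (nmax - 1) * 2 - interval else interval) = 2 * n) := by
        have hmod : (i + interval) % ((nmax - 1) * 2) =
            (i % ((nmax - 1) * 2) + interval) % ((nmax - 1) * 2) := pv_mod_shift _ _ _
        rcases hinv with ⟨h, hiv⟩ | ⟨hne, h, hiv⟩
        · by_cases hedge : n = 0 ∨ n = nmax - 1
          · rw [if_pos hedge] at hiv
            left
            constructor
            · rw [hmod, h, hiv, pv_mod_reduce _ _ (by omega) (by omega)]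
              omega
            · rw [if_neg (by omega), if_pos hedge]; exact hiv
          · rw [if_neg hedge] at hiv
            right
            refine ⟨hedge, ?_, ?_⟩
            · rw [hmod, h, hiv, Int.emod_eq_of_lt (by omega) (by omega)]; omega
            · rw [if_pos (by omega)]; omega
        · left
          constructor
          · rw [hmod, h, hiv, pv_mod_reduce _ _ (by omega) (by omega)]; omega
          · rw [if_pos (by omega), if_neg hne]; omega
      -- unfold one loop step and use the induction hypothesis
      show pvLoopA cs n nmax ((nmax - 1) * 2) (fuel + 1) i interval acc = _
      rw [pvLoopA, if_pos hil,
          ih (i + interval) _ _ (by omega) hinv' (by omega),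
          pvSel_cons cs _ n i.toNat (by omega),
          pvSel_skip cs _ n (interval - 1).toNat (i.toNat + 1) hskip,
          show i.toNat + 1 + (interval - 1).toNat = (i + interval).toNat from by omega,
          hgi]
      simp [List.append_assoc]
    · rw [pvLoopA, if_neg hil, pvSel_nil cs _ n i.toNat (by omega), List.append_nil]

-- B computes pvSel from index 0
lemma pvAlt_eq (s : String) (n nmax : Int) (h2 : 2 ≤ nmax) (hn0 : 0 ≤ n)
    (hn1 : n ≤ nmax - 1) :
    convert_one_line_alt s n nmax = String.mk (pvSel s.toList ((nmax - 1) * 2) n 0) := by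
  have hcyc : (0 : Int) < (nmax - 1) * 2 := by omega
  unfold convert_one_line_alt
  simp only []
  congr 1
  have hbody : ∀ (acc : List Char) (i : Nat),
      (fun (acc : List Char) (i : Nat) =>
        let p := PySem.Int.mod (Int.ofNat i) ((nmax - 1) * 2)
        let row := if p < nmax then p else (nmax - 1) * 2 - p
        if row = n then acc ++ (PySem.List.pyGet? s.toList (Int.ofNat i)).toList else acc)
        acc i = acc ++ pvG s.toList ((nmax - 1) * 2) n i := by
    intro acc i
    have hp : PySem.Int.mod ((i : Int)) ((nmax - 1) * 2) = (i : Int) % ((nmax - 1) * 2) :=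
      PySem.Int.mod_eq_emod_of_pos hcyc
    have hp0 : 0 ≤ (i : Int) % ((nmax - 1) * 2) := Int.emod_nonneg _ (by omega)
    have hpc : (i : Int) % ((nmax - 1) * 2) < (nmax - 1) * 2 := Int.emod_lt_of_pos _ hcyc
    simp only [Int.ofNat_eq_natCast, hp, pvG]
    split_ifs <;> first | rfl | (exfalso; omega) | simp
  calc (List.range s.toList.length).foldl _ [] =
      (List.range s.toList.length).foldl
        (fun acc i => acc ++ pvG s.toList ((nmax - 1) * 2) n i) [] := by
        apply PySem.List.foldl_congr_mem
        intro acc i _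
        exact hbody acc i
    _ = pvSel s.toList ((nmax - 1) * 2) n 0 := by
        rw [PySem.List.foldl_append_eq_flatMap, List.nil_append, pvSel,
            Nat.sub_zero, List.range_eq_range']

-- a foldl whose body never changes the accumulator returns its initial value
lemma pv_foldl_keep (l : List Nat) (f : List Char → Nat → List Char) (init : List Char)
    (hf : ∀ acc x, x ∈ l → f acc x = acc) : l.foldl f init = init := by
  induction l generalizing init with
  | nil => rfl
  | cons a l ih =>
    rw [List.foldl_cons, hf init a (List.mem_cons_self)]
    exact ih init (fun acc x hx => hf acc x (List.mem_cons_of_mem a hx))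

-- B returns "" whenever no index's row can equal n
lemma pvAlt_nil (s : String) (n nmax : Int)
    (h : ∀ i : Nat, i ∈ List.range s.toList.length →
      (if PySem.Int.mod ((i : Int)) ((nmax - 1) * 2) < nmax
        then PySem.Int.mod ((i : Int)) ((nmax - 1) * 2)
        else (nmax - 1) * 2 - PySem.Int.mod ((i : Int)) ((nmax - 1) * 2)) ≠ n) :
    convert_one_line_alt s n nmax = String.mk [] := by
  unfold convert_one_line_alt
  simp only []
  congr 1
  apply pv_foldl_keep
  intro acc x hx
  simp only [Int.ofNat_eq_natCast]
  exact if_neg (h x hx)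

-- A returns "" as soon as len(s) ≤ n (the loop guard fails at once)
lemma pvLoopA_nil (cs : List Char) (n nmax r step : Int) (h : (cs.length : Int) ≤ n) :
    pvLoopA cs n nmax r (cs.length + 1) n step [] = [] := by
  rw [pvLoopA, if_neg (by omega)]

-- the main equivalence on the row-extraction domain
lemma pv_main (s : String) (n nmax : Int)
    (h2 : 2 ≤ nmax) (hn0 : 0 ≤ n) (hn1 : n ≤ nmax - 1) :
    convert_one_line s n nmax = convert_one_line_alt s n nmax := by
  rw [pvAlt_eq s n nmax h2 hn0 hn1]
  unfold convert_one_line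
  simp only []
  congr 1
  rw [pvLoopA_eq s.toList n nmax h2 hn0 hn1 (s.toList.length + 1) n _ [] hn0
      (Or.inl ⟨Int.emod_eq_of_lt hn0 (by omega), rfl⟩) (by omega),
      List.nil_append,
      pvSel_skip s.toList ((nmax - 1) * 2) n n.toNat 0
        (fun j hj1 hj2 => ?_)]
  · rw [Nat.zero_add]
  · unfold pvG
    rw [if_neg]
    rw [Int.emod_eq_of_lt (by omega) (by omega)]
    omega

-- ===== VERDICT (by name: the statement is the Claim_ definition above) =====
theorem convert_one_line_spec : Claim_equal_convert_one_line := by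
  intro s n nmax _ hpre
  unfold Spec_convert_one_line
  by_cases hmain : 2 ≤ nmax ∧ 0 ≤ n ∧ n ≤ nmax - 1
  · exact pv_main s n nmax hmain.1 hmain.2.1 hmain.2.2
  obtain ⟨hn0, hlen, hshape⟩ : 0 ≤ n ∧ (s.toList.length : Int) ≤ n ∧
      (2 ≤ nmax ∨ s.toList.length = 0 ∨ nmax ≤ 0) := by
    rcases hpre with h | h
    · exact absurd h hmain
    · exact h
  have hA : convert_one_line s n nmax = String.mk [] := by
    unfold convert_one_line
    simp only []
    rw [pvLoopA_nil s.toList n nmax _ _ hlen]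
  rw [hA, pvAlt_nil s n nmax ?_]
  intro i hi
  rw [List.mem_range] at hi
  rcases hshape with hx | hx | hx
  · -- 2 ≤ nmax and (from ¬hmain) nmax ≤ n: every row is < nmax ≤ n
    have hbig : nmax ≤ n := by omega
    have hcyc : (0 : Int) < (nmax - 1) * 2 := by omega
    rw [PySem.Int.mod_eq_emod_of_pos hcyc]
    have h0 : 0 ≤ (i : Int) % ((nmax - 1) * 2) := Int.emod_nonneg _ (by omega)
    have h1 : (i : Int) % ((nmax - 1) * 2) < (nmax - 1) * 2 := Int.emod_lt_of_pos _ hcyc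
    split_ifs <;> omega
  · omega
  · -- nmax ≤ 0: the divisor is negative, every row is ≤ 0 < n
    have hcyc : (nmax - 1) * 2 < 0 := by omega
    have hb := PySem.Int.mod_neg_bounds (a := (i : Int)) hcyc
    have hn1 : 1 ≤ n := by omega
    split_ifs <;> omega
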